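-- pv_equiv track=rewrite | github.com/volcengine/verl | atropos/environments/intern_bootcamp/internbootcamp_lib/internbootcamp/bootcamp/clittlefrog/clittlefrog.py | _generate_solution
-- ===== SOURCE A (Python) =====
-- def _generate_solution(n):
--     if n == 1:
--         return [1]
--     solution = []
--     i = 1
--     j = n
--     while i <= j:
--         solution.append(i)
--         if i != j:
--             solution.append(j)
--         i += 1
--         j -= 1
--     # 确保长度正确，处理n为奇数的情况
--     return solution[:n]
-- ===== SOURCE B (Python) =====
-- def _generate_solution(n):
--     return [(k // 2 + 1) if k % 2 == 0 else (n - k // 2) for k in range(n)]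
-- ===== Notes on version B (the rewrite author's own statement) =====
-- stated objective: simpler
-- what changed: Replaced the front/back two-pointer convergence loop (with its i!=j meeting branch and final defensive slice) by a single comprehension computing each position from a closed-form parity formula: even indices count up from 1, odd indices count down from n.
import Mathlib
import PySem

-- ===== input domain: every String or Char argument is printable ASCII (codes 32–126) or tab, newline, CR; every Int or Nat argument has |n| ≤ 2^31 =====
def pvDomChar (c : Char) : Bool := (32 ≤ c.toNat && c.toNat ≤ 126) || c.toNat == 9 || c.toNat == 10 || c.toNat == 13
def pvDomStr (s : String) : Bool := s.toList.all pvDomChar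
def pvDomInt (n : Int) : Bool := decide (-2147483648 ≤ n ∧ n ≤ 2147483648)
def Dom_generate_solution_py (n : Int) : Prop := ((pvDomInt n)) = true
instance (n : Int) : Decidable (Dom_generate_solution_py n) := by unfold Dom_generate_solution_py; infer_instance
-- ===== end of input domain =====

-- B replaces A's two-pointer convergence loop by a closed-form per-index parity formula (simpler, same O(n) cost).

-- ===== PORT A =====
-- while i <= j: solution.append(i); if i != j: solution.append(j); i += 1; j -= 1
def pvLoopA (i j : Int) (acc : List Int) : List Int :=
  if i ≤ j then
    pvLoopA (i + 1) (j - 1) ((acc ++ [i]) ++ (if i ≠ j then [j] else []))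
  else acc
termination_by (j - i + 1).toNat
decreasing_by omega

def generate_solution_py (n : Int) : List Int :=
  if n = 1 then [1]
  else PySem.List.slice (pvLoopA 1 n []) none (some n)   -- solution[:n]

-- ===== PORT B =====
def generate_solution_py_alt (n : Int) : List Int :=
  (PySem.List.pyRange 0 n 1).map (fun k =>
    if PySem.Int.mod k 2 = 0 then PySem.Int.floordiv k 2 + 1 else n - PySem.Int.floordiv k 2)

-- ===== PRECONDITION & SPEC =====
def Spec_generate_solution_py (n : Int) (out : List Int) : Prop := out = generate_solution_py_alt n
instance (n : Int) (out : List Int) : Decidable (Spec_generate_solution_py n out) := by unfold Spec_generate_solution_py; infer_instance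

-- ===== CLAIM (what is proved, stated in full; the proofs are below) =====
def Claim_equal_generate_solution_py : Prop := ∀ (n : Int), Dom_generate_solution_py n → Spec_generate_solution_py n (generate_solution_py n)

-- ===== LEMMAS AND PROOFS =====

theorem pvLoopA_acc_aux (m : Nat) (i j : Int) (acc : List Int)
    (hm : (j - i + 1).toNat = m) :
    pvLoopA i j acc = acc ++ pvLoopA i j [] := by
  induction m using Nat.strong_induction_on generalizing i j acc with
  | _ m ih =>
    by_cases hle : i ≤ j
    · rw [pvLoopA, if_pos hle]
      conv_rhs => rw [pvLoopA, if_pos hle]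
      rw [ih (j - 1 - (i + 1) + 1).toNat (by omega) _ _ _ rfl,
          ih (j - 1 - (i + 1) + 1).toNat (by omega) (i + 1) (j - 1)
            ((([] ++ [i]) ++ if i ≠ j then [j] else [])) rfl]
      simp
    · rw [pvLoopA, if_neg hle]
      conv_rhs => rw [pvLoopA, if_neg hle]
      simp

theorem pvLoopA_acc (i j : Int) (acc : List Int) :
    pvLoopA i j acc = acc ++ pvLoopA i j [] :=
  pvLoopA_acc_aux (j - i + 1).toNat i j acc rfl

-- the loop from (i, j) produces exactly the parity-interleaved range of length j - i + 1
theorem pvLoopA_eq (m : Nat) (i j : Int) (hm : j - i + 1 = (m : Int)) :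
    pvLoopA i j [] = (List.range m).map
      (fun k => if k % 2 = 0 then i + (k / 2 : Nat) else j - (k / 2 : Nat)) := by
  induction m using Nat.strong_induction_on generalizing i j with
  | _ m ih =>
    match m with
    | 0 =>
        rw [pvLoopA, if_neg (by omega)]; simp
    | 1 =>
        have hij : i = j := by omega
        rw [pvLoopA, if_pos (by omega), if_neg (by omega), pvLoopA, if_neg (by omega)]
        simp [hij]
    | (m' + 2) =>
        have hlt : i < j := by omega
        rw [pvLoopA, if_pos (by omega), if_pos (by omega : i ≠ j), pvLoopA_acc,
            ih m' (by omega) (i + 1) (j - 1) (by omega)]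
        have hr : List.range (m' + 2) = 0 :: 1 :: (List.range m').map (fun k => k + 2) := by
          rw [List.range_succ_eq_map, List.range_succ_eq_map]
          simp [List.map_map, Function.comp_def]
        rw [hr]
        simp only [List.map_cons, List.map_map, Function.comp_def]
        have hmap : List.map (fun x => if (x + 2) % 2 = 0 then i + (((x + 2) / 2 : Nat) : Int)
              else j - (((x + 2) / 2 : Nat) : Int)) (List.range m') =
            List.map (fun k => if k % 2 = 0 then i + 1 + ((k / 2 : Nat) : Int)
              else j - 1 - ((k / 2 : Nat) : Int)) (List.range m') := by
          apply List.map_congr_left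
          intro k _
          have h2 : (k + 2) % 2 = k % 2 := by omega
          have h3 : (k + 2) / 2 = k / 2 + 1 := by omega
          rw [h2, h3]
          by_cases hk : k % 2 = 0
          · rw [if_pos hk, if_pos hk]; push_cast; ring
          · rw [if_neg hk, if_neg hk]; push_cast; ring
        rw [hmap]
        norm_num

theorem alt_eq_range (n : Int) (hn : 0 ≤ n) :
    generate_solution_py_alt n = (List.range n.toNat).map
      (fun k => if k % 2 = 0 then (1 : Int) + ((k / 2 : Nat) : Int) else n - ((k / 2 : Nat) : Int)) := by
  unfold generate_solution_py_alt
  rw [PySem.List.pyRange_one]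
  simp only [List.map_map, Function.comp_def, sub_zero, zero_add]
  apply List.map_congr_left
  intro k _
  have hmod : PySem.Int.mod (k : Int) 2 = ((k % 2 : Nat) : Int) := by
    simp [PySem.Int.mod, Int.fmod_eq_emod]
  have hdiv : PySem.Int.floordiv (k : Int) 2 = ((k / 2 : Nat) : Int) := by
    simp [PySem.Int.floordiv, Int.fdiv_eq_ediv]
  rw [hmod, hdiv]
  by_cases hk : k % 2 = 0
  · rw [if_pos (by omega), if_pos hk]; ring
  · rw [if_neg (by omega), if_neg hk]

-- ===== VERDICT (by name: the statement is the Claim_ definition above) =====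
theorem generate_solution_py_spec : Claim_equal_generate_solution_py := by
  intro n _
  unfold Spec_generate_solution_py generate_solution_py
  by_cases h1 : n = 1
  · subst h1; decide
  rw [if_neg h1]
  by_cases hn : n ≤ 0
  · rw [pvLoopA, if_neg (by omega)]
    unfold generate_solution_py_alt
    rw [PySem.List.pyRange_one_eq_nil (by omega)]
    simp [PySem.List.slice]
  · have hn0 : 0 ≤ n := by omega
    have := pvLoopA_eq n.toNat 1 n (by omega)
    rw [this, alt_eq_range n hn0,
        PySem.List.slice_to _ hn0]
    rw [List.take_of_length_le (by simp)]
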